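-- pv_equiv track=rewrite | github.com/evosoftwares/evo-website | generate_blog.py | fix_relative_paths
-- ===== SOURCE A (Python) =====
-- def fix_relative_paths(html):
--     # Fix CSS, JS, Image links to be relative to /blog/
--     # Add ../ to known relative paths
--
--     replacements = [
--         ('href="styles.css"', 'href="../styles.css"'),
--         ('href="favicon.svg"', 'href="../favicon.svg"'),
--         ('href="favicon.ico"', 'href="../favicon.ico"'),
--         ('href="index.html', 'href="../index.html'),
--         ('href="about.html"', 'href="../about.html"'),
--         ('href="portfolio.html"', 'href="../portfolio.html"'),
--         ('href="materiais.html"', 'href="../materiais.html"'),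
--         ('href="suporte.html"', 'href="../suporte.html"'),
--         ('href="lgpd.html"', 'href="../lgpd.html"'),
--         ('href="registro-marca.html"', 'href="../registro-marca.html"'),
--         ('href="privacy.html"', 'href="../privacy.html"'),
--         ('href="termos.html"', 'href="../termos.html"'),
--         ('href="ajuda.html"', 'href="../ajuda.html"'),
--         ('src="image05 1.svg"', 'src="../image05 1.svg"'),
--         ('src="script.js"', 'src="../script.js"'),
--         ('src="/manifest.json"', 'src="../manifest.json"'), # usually absolute / but if relative...
--         ('href="/manifest.json"', 'href="../manifest.json"'),
--         ('href="/icon-apple-touch.png"', 'href="../icon-apple-touch.png"'),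
--         # Fix navbar anchor links which might break? index.html#home -> ../index.html#home is handled above
--     ]
--
--     for old, new in replacements:
--         html = html.replace(old, new)
--
--     return html
-- ===== SOURCE B (Python) =====
-- # Single left-to-right scan: at each position try the replacement table once
-- # (first match wins), instead of 18 sequential whole-string passes.
-- _REPLACEMENTS = [
--     ('href="styles.css"', 'href="../styles.css"'),
--     ('href="favicon.svg"', 'href="../favicon.svg"'),
--     ('href="favicon.ico"', 'href="../favicon.ico"'),
--     ('href="index.html', 'href="../index.html'),
--     ('href="about.html"', 'href="../about.html"'),
--     ('href="portfolio.html"', 'href="../portfolio.html"'),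
--     ('href="materiais.html"', 'href="../materiais.html"'),
--     ('href="suporte.html"', 'href="../suporte.html"'),
--     ('href="lgpd.html"', 'href="../lgpd.html"'),
--     ('href="registro-marca.html"', 'href="../registro-marca.html"'),
--     ('href="privacy.html"', 'href="../privacy.html"'),
--     ('href="termos.html"', 'href="../termos.html"'),
--     ('href="ajuda.html"', 'href="../ajuda.html"'),
--     ('src="image05 1.svg"', 'src="../image05 1.svg"'),
--     ('src="script.js"', 'src="../script.js"'),
--     ('src="/manifest.json"', 'src="../manifest.json"'),
--     ('href="/manifest.json"', 'href="../manifest.json"'),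
--     ('href="/icon-apple-touch.png"', 'href="../icon-apple-touch.png"'),
-- ]
--
-- def fix_relative_paths(html):
--     out = []
--     i = 0
--     n = len(html)
--     while i < n:
--         for old, new in _REPLACEMENTS:
--             if html.startswith(old, i):
--                 out.append(new)
--                 i += len(old)
--                 break
--         else:
--             out.append(html[i])
--             i += 1
--     return ''.join(out)
-- ===== Notes on version B (the rewrite author's own statement) =====
-- stated objective: alternative
-- what changed: Replaces A's 18 sequential whole-string str.replace passes by a single left-to-right scan that at each position tries the replacement table once (first match wins), emits the replacement and skips the matched key; equivalence holds because no key starts inside another key or inside any replacement text.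
import Mathlib
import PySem

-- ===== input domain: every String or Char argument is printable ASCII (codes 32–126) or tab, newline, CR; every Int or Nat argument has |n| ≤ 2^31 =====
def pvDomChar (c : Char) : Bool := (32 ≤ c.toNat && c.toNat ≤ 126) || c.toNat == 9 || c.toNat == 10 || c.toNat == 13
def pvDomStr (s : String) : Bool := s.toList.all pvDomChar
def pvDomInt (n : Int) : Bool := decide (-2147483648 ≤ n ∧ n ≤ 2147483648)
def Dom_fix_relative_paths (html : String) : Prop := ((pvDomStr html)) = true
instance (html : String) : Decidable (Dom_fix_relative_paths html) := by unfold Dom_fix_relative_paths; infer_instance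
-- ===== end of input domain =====

-- B replaces A's 18 sequential whole-string .replace passes by ONE left-to-right
-- scan with a first-match table lookup at each position (objective: alternative).

-- ===== PORT A =====
-- the literal `replacements` table of A
def pvRepls : List (String × String) :=
  [ ("href=\"styles.css\"", "href=\"../styles.css\""),
    ("href=\"favicon.svg\"", "href=\"../favicon.svg\""),
    ("href=\"favicon.ico\"", "href=\"../favicon.ico\""),
    ("href=\"index.html", "href=\"../index.html"),
    ("href=\"about.html\"", "href=\"../about.html\""),
    ("href=\"portfolio.html\"", "href=\"../portfolio.html\""),
    ("href=\"materiais.html\"", "href=\"../materiais.html\""),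
    ("href=\"suporte.html\"", "href=\"../suporte.html\""),
    ("href=\"lgpd.html\"", "href=\"../lgpd.html\""),
    ("href=\"registro-marca.html\"", "href=\"../registro-marca.html\""),
    ("href=\"privacy.html\"", "href=\"../privacy.html\""),
    ("href=\"termos.html\"", "href=\"../termos.html\""),
    ("href=\"ajuda.html\"", "href=\"../ajuda.html\""),
    ("src=\"image05 1.svg\"", "src=\"../image05 1.svg\""),
    ("src=\"script.js\"", "src=\"../script.js\""),
    ("src=\"/manifest.json\"", "src=\"../manifest.json\""),
    ("href=\"/manifest.json\"", "href=\"../manifest.json\""),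
    ("href=\"/icon-apple-touch.png\"", "href=\"../icon-apple-touch.png\"") ]

-- `for old, new in replacements: html = html.replace(old, new)`
def fix_relative_paths (html : String) : String :=
  pvRepls.foldl (fun h p => PySem.Str.replace h p.1 p.2) html

-- ===== PORT B =====
-- B's `_REPLACEMENTS` table, as char lists (the scanner works position by position)
def pvTableL : List (List Char × List Char) :=
  [ ("href=\"styles.css\"".toList, "href=\"../styles.css\"".toList),
    ("href=\"favicon.svg\"".toList, "href=\"../favicon.svg\"".toList),
    ("href=\"favicon.ico\"".toList, "href=\"../favicon.ico\"".toList),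
    ("href=\"index.html".toList, "href=\"../index.html".toList),
    ("href=\"about.html\"".toList, "href=\"../about.html\"".toList),
    ("href=\"portfolio.html\"".toList, "href=\"../portfolio.html\"".toList),
    ("href=\"materiais.html\"".toList, "href=\"../materiais.html\"".toList),
    ("href=\"suporte.html\"".toList, "href=\"../suporte.html\"".toList),
    ("href=\"lgpd.html\"".toList, "href=\"../lgpd.html\"".toList),
    ("href=\"registro-marca.html\"".toList, "href=\"../registro-marca.html\"".toList),
    ("href=\"privacy.html\"".toList, "href=\"../privacy.html\"".toList),
    ("href=\"termos.html\"".toList, "href=\"../termos.html\"".toList),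
    ("href=\"ajuda.html\"".toList, "href=\"../ajuda.html\"".toList),
    ("src=\"image05 1.svg\"".toList, "src=\"../image05 1.svg\"".toList),
    ("src=\"script.js\"".toList, "src=\"../script.js\"".toList),
    ("src=\"/manifest.json\"".toList, "src=\"../manifest.json\"".toList),
    ("href=\"/manifest.json\"".toList, "href=\"../manifest.json\"".toList),
    ("href=\"/icon-apple-touch.png\"".toList, "href=\"../icon-apple-touch.png\"".toList) ]

-- B's while loop: at each position, first matching table entry (`html.startswith(old, i)`)
-- emits its replacement and skips len(old) chars; otherwise the char is copied.
def pvScan (rules : List (List Char × List Char)) : List Char → List Char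
  | [] => []
  | c :: s =>
    match rules.find? (fun r => r.1.isPrefixOf (c :: s)) with
    | some r => r.2 ++ pvScan rules (s.drop (r.1.length - 1))
    | none => c :: pvScan rules s
termination_by s => s.length
decreasing_by
  · simp [List.length_drop]
  · simp

def fix_relative_paths_alt (html : String) : String :=
  String.ofList (pvScan pvTableL html.toList)

-- ===== PRECONDITION & SPEC =====
def Spec_fix_relative_paths (html : String) (out : String) : Prop := out = fix_relative_paths_alt html
instance (html : String) (out : String) : Decidable (Spec_fix_relative_paths html out) := by unfold Spec_fix_relative_paths; infer_instance

-- ===== CLAIM (what is proved, stated in full; the proofs are below) =====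
def Claim_equal_fix_relative_paths : Prop := ∀ (html : String), Dom_fix_relative_paths html → Spec_fix_relative_paths html (fix_relative_paths html)

-- ===== LEMMAS AND PROOFS =====

-- structural mirror of PySem.Chars.replace (for nonempty pattern): the natural recursion
def pvRepl (old new : List Char) : List Char → List Char
  | [] => []
  | c :: t =>
    if old.isPrefixOf (c :: t) then new ++ pvRepl old new (t.drop (old.length - 1))
    else c :: pvRepl old new t
termination_by l => l.length
decreasing_by
  · simp [List.length_drop]
  · simp

-- `a` starts at no position strictly inside `b` (every nonempty suffix of `b` is
-- prefix-incomparable with `a`)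
abbrev pvIndep (a b : List Char) : Prop :=
  ∀ t ∈ b.tails, t ≠ [] → ¬ a.isPrefixOf t ∧ ¬ t.isPrefixOf a

-- the per-pair side condition under which a later rule (k,n) commutes past an earlier rule q
abbrev pvPairOK (q r : List Char × List Char) : Prop :=
  pvIndep r.1 q.2 ∧ pvIndep q.1 r.1 ∧ pvIndep q.2 (r.1.drop 1)

theorem pv_prefix_cases {k t x : List Char} (h : k <+: t ++ x) : k <+: t ∨ t <+: k :=
  List.prefix_or_prefix_of_prefix h (List.prefix_append t x)

theorem pv_drop_pred {c : Char} {t : List Char} {old : List Char} (h : old ≠ []) :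
    t.drop (old.length - 1) = (c :: t).drop old.length := by
  cases old with
  | nil => exact absurd rfl h
  | cons a l => simp

-- pvRepl agrees with PySem.Chars.replace.go (fuel ≥ length, nonempty pattern)
theorem pv_go_eq (old new : List Char) (h : old ≠ []) :
    ∀ (fuel : Nat) (l acc : List Char), l.length ≤ fuel →
      PySem.Chars.replace.go old new fuel l acc = acc.reverse ++ pvRepl old new l := by
  intro fuel
  induction fuel with
  | zero =>
    intro l acc hl
    have : l = [] := List.eq_nil_of_length_eq_zero (Nat.le_zero.mp hl)
    subst this
    simp [PySem.Chars.replace.go, pvRepl]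
  | succ f ih =>
    intro l acc hl
    cases l with
    | nil => simp [PySem.Chars.replace.go, pvRepl]
    | cons c t =>
      rw [PySem.Chars.replace.go]
      by_cases hp : old.isPrefixOf (c :: t)
      · have hlen : 1 ≤ old.length := by
          cases old with
          | nil => exact absurd rfl h
          | cons a l => simp
        have hdrop : ((c :: t).drop old.length).length ≤ f := by
          rw [List.length_drop]
          simp only [List.length_cons] at hl ⊢
          omega
        rw [if_pos hp, ih _ _ hdrop]
        have : pvRepl old new (c :: t) = new ++ pvRepl old new (t.drop (old.length - 1)) := by
          rw [pvRepl, if_pos hp]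
        rw [this, pv_drop_pred (c := c) h]
        simp
      · rw [if_neg hp, ih t (c :: acc) (by simpa using Nat.le_of_succ_le_succ (by simpa using hl))]
        have : pvRepl old new (c :: t) = c :: pvRepl old new t := by
          rw [pvRepl, if_neg hp]
        rw [this]
        simp

theorem pv_replace_eq (old new l : List Char) (h : old ≠ []) :
    PySem.Chars.replace l old new = pvRepl old new l := by
  rw [PySem.Chars.replace]
  rw [if_neg (by simpa using h)]
  simpa using pv_go_eq old new h l.length l [] (Nat.le_refl _)

-- pvRepl slides over a prefix `p` in which (and across whose end) the pattern never starts
theorem pv_repl_append (k n p : List Char) (h : pvIndep k p) :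
    ∀ x, pvRepl k n (p ++ x) = p ++ pvRepl k n x := by
  induction p with
  | nil => intro x; simp
  | cons c p' ih =>
    intro x
    have hind := h (c :: p') ((List.mem_tails _ _).mpr (List.suffix_refl _)) (by simp)
    have hnp : ¬ k.isPrefixOf (c :: (p' ++ x)) := by
      intro hpre
      rcases pv_prefix_cases (t := c :: p') (List.isPrefixOf_iff_prefix.mp hpre) with h1 | h2
      · exact hind.1 (List.isPrefixOf_iff_prefix.mpr h1)
      · exact hind.2 (List.isPrefixOf_iff_prefix.mpr h2)
    have hsub : pvIndep k p' := by
      intro t ht hne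
      exact h t ((List.mem_tails _ _).mpr (((List.mem_tails _ _).mp ht).trans (List.suffix_cons c p'))) hne
    calc pvRepl k n ((c :: p') ++ x) = c :: pvRepl k n (p' ++ x) := by
          rw [List.cons_append, pvRepl, if_neg (by simp [hnp])]
      _ = c :: (p' ++ pvRepl k n x) := by rw [ih hsub]
      _ = (c :: p') ++ pvRepl k n x := rfl

-- the scanner slides over a prefix `p` inside which no rule starts a match
theorem pv_scan_append (rules : List (List Char × List Char)) (p : List Char)
    (h : ∀ r ∈ rules, pvIndep r.1 p) :
    ∀ x, pvScan rules (p ++ x) = p ++ pvScan rules x := by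
  induction p with
  | nil => intro x; simp
  | cons c p' ih =>
    intro x
    have hnone : rules.find? (fun r => r.1.isPrefixOf (c :: (p' ++ x))) = none := by
      rw [List.find?_eq_none]
      intro r hr hpre
      have hind := h r hr (c :: p') ((List.mem_tails _ _).mpr (List.suffix_refl _)) (by simp)
      rcases pv_prefix_cases (t := c :: p') (List.isPrefixOf_iff_prefix.mp hpre) with h1 | h2
      · exact hind.1 (List.isPrefixOf_iff_prefix.mpr h1)
      · exact hind.2 (List.isPrefixOf_iff_prefix.mpr h2)
    have hsub : ∀ r ∈ rules, pvIndep r.1 p' := by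
      intro r hr t ht hne
      exact h r hr t ((List.mem_tails _ _).mpr (((List.mem_tails _ _).mp ht).trans (List.suffix_cons c p'))) hne
    calc pvScan rules ((c :: p') ++ x) = c :: pvScan rules (p' ++ x) := by
          rw [List.cons_append, pvScan, hnone]
      _ = (c :: p') ++ pvScan rules x := by rw [ih hsub]; rfl

-- a word that starts neither in the untouched text nor prefix-overlaps any replacement
-- is not a prefix of the scanner's output
theorem pv_no_prefix_scan (rules : List (List Char × List Char)) :
    ∀ (s t : List Char), t ≠ [] → ¬ t <+: s → (∀ r ∈ rules, pvIndep r.2 t) →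
      ¬ t <+: pvScan rules s := by
  intro s
  induction s with
  | nil => intro t htne _ _ hpre; simp [pvScan] at hpre; exact htne hpre
  | cons c s' ih =>
    intro t htne hts hind hpre
    rw [pvScan] at hpre
    cases hfind : rules.find? (fun r => r.1.isPrefixOf (c :: s')) with
    | some r =>
      rw [hfind] at hpre
      have hr : r ∈ rules := List.mem_of_find?_eq_some hfind
      have hself := hind r hr t (by simp) htne
      rcases pv_prefix_cases hpre with h1 | h2
      · exact hself.2 (List.isPrefixOf_iff_prefix.mpr h1)
      · exact hself.1 (List.isPrefixOf_iff_prefix.mpr h2)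
    | none =>
      rw [hfind] at hpre
      cases t with
      | nil => exact htne rfl
      | cons d t' =>
        have hd : d = c := (List.cons_prefix_cons.mp hpre).1
        subst hd
        have ht' : t' <+: pvScan rules s' := (List.cons_prefix_cons.mp hpre).2
        rcases eq_or_ne t' [] with h0 | hne0
        · subst h0
          exact hts (List.cons_prefix_cons.mpr ⟨rfl, List.nil_prefix⟩)
        · refine ih t' hne0 ?_ ?_ ht'
          · intro hc; exact hts (List.cons_prefix_cons.mpr ⟨rfl, hc⟩)
          · intro r hr v hv hvne
            exact hind r hr v ((List.mem_tails _ _).mpr (((List.mem_tails _ _).mp hv).trans (List.suffix_cons d t'))) hvne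

-- key step: one more sequential replace equals the scanner with one more rule appended
theorem pv_step (rules : List (List Char × List Char)) (k n : List Char)
    (hk : k ≠ [])
    (hkeys : ∀ r ∈ rules, r.1 ≠ [])
    (hok : ∀ r ∈ rules, pvPairOK r (k, n)) :
    ∀ s, pvRepl k n (pvScan rules s) = pvScan (rules ++ [(k, n)]) s := by
  intro s
  induction hs : s.length using Nat.strong_induction_on generalizing s with
  | _ m ihm =>
  subst hs
  cases s with
  | nil => simp [pvScan, pvRepl]
  | cons c s₀ =>
    cases hfind : rules.find? (fun r => r.1.isPrefixOf (c :: s₀)) with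
    | some r =>
      -- an earlier rule matches at the head
      have hr : r ∈ rules := List.mem_of_find?_eq_some hfind
      have hrne : r.1 ≠ [] := hkeys r hr
      have hdlt : (s₀.drop (r.1.length - 1)).length < (c :: s₀).length := by
        simp [List.length_drop]
      have hfind' : (rules ++ [(k, n)]).find? (fun r => r.1.isPrefixOf (c :: s₀)) = some r := by
        rw [List.find?_append, hfind]; rfl
      rw [pvScan, hfind, pv_repl_append k n r.2 ((hok r hr).1),
          ihm _ hdlt _ rfl, pvScan, hfind']
    | none =>
      by_cases hkp : k.isPrefixOf (c :: s₀)
      · -- the new rule matches at the head; no old rule matches anywhere inside it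
        obtain ⟨x, hx⟩ := List.isPrefixOf_iff_prefix.mp hkp
        have hfind' : (rules ++ [(k, n)]).find? (fun r => r.1.isPrefixOf (c :: s₀)) = some (k, n) := by
          rw [List.find?_append, hfind]
          simp [hkp]
        have hscan : pvScan rules (c :: s₀) = k ++ pvScan rules x := by
          rw [← hx]
          exact pv_scan_append rules k (fun r hr => (hok r hr).2.1) x
        have hxlen : x.length < (c :: s₀).length := by
          have hlx : k.length + x.length = s₀.length + 1 := by
            have h := congrArg List.length hx
            simpa using h
          have hk1 : 1 ≤ k.length := List.length_pos_iff.mpr hk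
          simp only [List.length_cons]
          omega
        have hrepl : pvRepl k n (k ++ pvScan rules x) = n ++ pvRepl k n (pvScan rules x) := by
          cases hke : k with
          | nil => exact absurd hke hk
          | cons a l =>
            rw [← hke]
            have hkk : k.isPrefixOf (k ++ pvScan rules x) :=
              List.isPrefixOf_iff_prefix.mpr (List.prefix_append _ _)
            cases hke2 : (k ++ pvScan rules x) with
            | nil => simp [hke] at hke2
            | cons b m =>
              rw [pvRepl, if_pos (hke2 ▸ hkk)]
              congr 1
              have : m.drop (k.length - 1) = ((b :: m).drop k.length) := pv_drop_pred hk
              rw [this, ← hke2]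
              simp
        have hdrop : (c :: s₀).drop k.length = x := by rw [← hx]; simp
        have hdrop2 : s₀.drop (k.length - 1) = x := by rw [pv_drop_pred hk (c := c), hdrop]
        rw [hscan, hrepl, ihm _ hxlen _ rfl]
        show _ = pvScan (rules ++ [(k, n)]) (c :: s₀)
        rw [pvScan, hfind']
        show _ = n ++ pvScan (rules ++ [(k, n)]) (s₀.drop (k.length - 1))
        rw [hdrop2]
      · -- no rule at all matches at the head
        have hfind' : (rules ++ [(k, n)]).find? (fun r => r.1.isPrefixOf (c :: s₀)) = none := by
          rw [List.find?_append, hfind]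
          simp [hkp]
        have hnop : ¬ k.isPrefixOf (c :: pvScan rules s₀) := by
          intro habs
          cases hke : k with
          | nil => exact hk hke
          | cons a k' =>
            subst hke
            have hac : a = c := (List.cons_prefix_cons.mp (List.isPrefixOf_iff_prefix.mp habs)).1
            subst hac
            have hk' : k' <+: pvScan rules s₀ :=
              (List.cons_prefix_cons.mp (List.isPrefixOf_iff_prefix.mp habs)).2
            rcases eq_or_ne k' [] with h0 | hne0
            · subst h0
              exact hkp (List.isPrefixOf_iff_prefix.mpr
                (List.cons_prefix_cons.mpr ⟨rfl, List.nil_prefix⟩))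
            · refine pv_no_prefix_scan rules s₀ k' hne0 ?_ ?_ hk'
              · intro hc
                exact hkp (List.isPrefixOf_iff_prefix.mpr (List.cons_prefix_cons.mpr ⟨rfl, hc⟩))
              · intro r hr
                have := (hok r hr).2.2
                simpa using this
        rw [pvScan, hfind]
        have : pvRepl k n (c :: pvScan rules s₀) = c :: pvRepl k n (pvScan rules s₀) := by
          rw [pvRepl, if_neg (by simpa using hnop)]
        rw [this, ihm _ (by simp) _ rfl, pvScan, hfind']

-- the scanner with no rules is the identity
theorem pv_scan_nil : ∀ s, pvScan [] s = s := by
  intro s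
  induction s with
  | nil => rw [pvScan]
  | cons c s' ih => rw [pvScan]; simp [ih]

-- chaining all rules: the sequential replaces equal the one-pass scanner
theorem pv_chain (rules : List (List Char × List Char))
    (hkeys : ∀ r ∈ rules, r.1 ≠ [])
    (hpw : List.Pairwise pvPairOK rules) :
    ∀ s, rules.foldl (fun acc r => pvRepl r.1 r.2 acc) s = pvScan rules s := by
  induction rules using List.reverseRecOn with
  | nil => intro s; rw [pv_scan_nil]; rfl
  | append_singleton init r ih =>
    intro s
    have hinit : ∀ q ∈ init, q.1 ≠ [] := fun q hq => hkeys q (by simp [hq])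
    have hpw' := (List.pairwise_append.mp hpw)
    have hok : ∀ q ∈ init, pvPairOK q r := fun q hq => hpw'.2.2 q hq r (by simp)
    rw [List.foldl_append, List.foldl_cons, List.foldl_nil,
        ih hinit hpw'.1, pv_step init r.1 r.2 (hkeys r (by simp)) hinit (by simpa using hok)]

-- ===== VERDICT (by name: the statement is the Claim_ definition above) =====
theorem fix_relative_paths_spec : Claim_equal_fix_relative_paths := by
  intro html _
  unfold Spec_fix_relative_paths fix_relative_paths fix_relative_paths_alt
  have hkeys : ∀ r ∈ pvTableL, r.1 ≠ [] := by decide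
  have hpw : List.Pairwise pvPairOK pvTableL := by decide
  have hfold : ∀ (s : String),
      (pvRepls.foldl (fun h p => PySem.Str.replace h p.1 p.2) s).toList =
        pvTableL.foldl (fun acc r => pvRepl r.1 r.2 acc) s.toList := by
    intro s
    have : ∀ (rs : List (String × String)) (l : String),
        (∀ r ∈ rs, r.1.toList ≠ []) →
        (rs.foldl (fun h p => PySem.Str.replace h p.1 p.2) l).toList =
          (rs.map (fun p => (p.1.toList, p.2.toList))).foldl
            (fun acc r => pvRepl r.1 r.2 acc) l.toList := by
      intro rs
      induction rs with
      | nil => intro l _; rfl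
      | cons p ps ih =>
        intro l hne
        rw [List.foldl_cons, List.map_cons, List.foldl_cons,
            ih _ (fun r hr => hne r (by simp [hr]))]
        congr 1
        rw [PySem.Str.toList_replace, pv_replace_eq _ _ _ (hne p (by simp))]
    have hne : ∀ r ∈ pvRepls, r.1.toList ≠ [] := by decide
    have htab : pvRepls.map (fun p => (p.1.toList, p.2.toList)) = pvTableL := by decide
    rw [this pvRepls s hne, htab]
  apply String.toList_injective
  rw [hfold html, pv_chain pvTableL hkeys hpw, String.toList_ofList]
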